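-- pv_equiv track=rewrite | github.com/prdx33/dotfiles | .config/sketchybar/icons/generate_icons.py | play_button
-- ===== SOURCE A (Python) =====
-- def play_button(color):
--     """Play triangle"""
--     pixels = {}
--     pattern = [
--         "          ",
--         " ##       ",
--         " ####     ",
--         " ######   ",
--         " ######## ",
--         " ######## ",
--         " ######   ",
--         " ####     ",
--         " ##       ",
--         "          ",
--     ]
--     for y, row in enumerate(pattern):
--         for x, char in enumerate(row):
--             if char == '#':
--                 pixels[(x, y)] = color
--     return pixels
-- ===== SOURCE B (Python) =====
-- def play_button(color):
--     """Play triangle, generated geometrically: row y has width 2*min(y, 9-y) starting at x=1."""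
--     pixels = {}
--     for y in range(10):
--         width = 2 * min(y, 9 - y)
--         for x in range(1, width + 1):
--             pixels[(x, y)] = color
--     return pixels
-- ===== Notes on version B (the rewrite author's own statement) =====
-- stated objective: simpler
-- what changed: Replaced the hardcoded 10-line ASCII pattern table and per-character scan with a closed-form geometric generation: row y gets pixels x=1..2*min(y,9-y).
import Mathlib
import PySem

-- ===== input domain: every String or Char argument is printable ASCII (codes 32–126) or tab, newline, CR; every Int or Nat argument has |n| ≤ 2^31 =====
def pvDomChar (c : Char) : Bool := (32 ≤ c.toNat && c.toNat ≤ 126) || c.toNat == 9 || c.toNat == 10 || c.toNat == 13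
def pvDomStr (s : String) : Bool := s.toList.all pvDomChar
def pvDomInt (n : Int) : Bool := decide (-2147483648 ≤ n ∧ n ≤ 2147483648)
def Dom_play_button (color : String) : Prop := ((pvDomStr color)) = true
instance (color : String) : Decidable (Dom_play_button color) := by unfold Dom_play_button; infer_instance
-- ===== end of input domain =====

-- B replaces A's hardcoded ASCII pattern table with a closed-form row width 2*min(y, 9-y): simpler, no table scan.

-- ===== PORT A =====
def play_button (color : String) : List (Int × Int × String) :=
  let pattern : List String :=
    [ "          ",
      " ##       ",
      " ####     ",
      " ######   ",
      " ######## ",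
      " ######## ",
      " ######   ",
      " ####     ",
      " ##       ",
      "          " ]
  let pixels : PySem.Dict (Int × Int) String :=
    (PySem.List.enumerate pattern).foldl (fun px (y, row) =>
      (PySem.List.enumerate row.toList).foldl (fun px (x, ch) =>
        if ch == '#' then px.insert (x, y) color else px) px)
      PySem.Dict.empty
  pixels.items.map (fun p => (p.1.1, p.1.2, p.2))

-- ===== PORT B =====
def play_button_alt (color : String) : List (Int × Int × String) :=
  let pixels : PySem.Dict (Int × Int) String :=
    (PySem.List.pyRange 0 10 1).foldl (fun px y =>
      let width := 2 * min y (9 - y)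
      (PySem.List.pyRange 1 (width + 1) 1).foldl (fun px x =>
        px.insert (x, y) color) px)
      PySem.Dict.empty
  pixels.items.map (fun p => (p.1.1, p.1.2, p.2))

-- ===== PRECONDITION & SPEC =====
def Spec_play_button (color : String) (out : List (Int × Int × String)) : Prop := out = play_button_alt color
instance (color : String) (out : List (Int × Int × String)) : Decidable (Spec_play_button color out) := by unfold Spec_play_button; infer_instance

-- ===== CLAIM (what is proved, stated in full; the proofs are below) =====
def Claim_equal_play_button : Prop := ∀ (color : String), Dom_play_button color → Spec_play_button color (play_button color)

-- ===== LEMMAS AND PROOFS =====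
-- Both ports fold over fixed literal data; for any color the two dicts evaluate
-- to the same literal list of keys each mapped to `color`, so plain evaluation
-- (simp with the definitions) closes the goal.
set_option maxRecDepth 8000 in
set_option maxHeartbeats 2000000 in
theorem play_button_eval (color : String) : play_button color = play_button_alt color := by
  simp [play_button, play_button_alt, PySem.List.enumerate, PySem.List.pyRange_one,
    PySem.Dict.insert, PySem.Dict.empty, PySem.Dict.contains, List.range_succ, min_def]

-- ===== VERDICT (by name: the statement is the Claim_ definition above) =====
theorem play_button_spec : Claim_equal_play_button := by
  intro color _
  exact play_button_eval color
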